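-- pv_equiv track=rewrite | github.com/slevinsps/tisd | homework1/zad/zad1_7.py | OpredGlav
-- ===== SOURCE A (Python) =====
-- def OpredGlav(a,n):
--     assert (1 <= n <= 100),"Некорректный размер матрицы"
--     assert (a != None),"Матрица не инициализирована"
--     kolvo_diag = 2*n-1
--     glav = [0] * (kolvo_diag)
--     for i in range(kolvo_diag):
--         glav[i] = [0] * n
--     for i in range(n):
--         for j in range(n):
--             glav[j-i+n-1][j] = a[i][j]
--     return glav
-- ===== SOURCE B (Python) =====
-- def OpredGlav(a, n):
--     assert (1 <= n <= 100), "Некорректный размер матрицы"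
--     assert (a != None), "Матрица не инициализирована"
--     return [[a[j - d + n - 1][j] if 0 <= j - d + n - 1 < n else 0
--              for j in range(n)]
--             for d in range(2 * n - 1)]
-- ===== Notes on version B (the rewrite author's own statement) =====
-- stated objective: simpler
-- what changed: B gathers: a single nested comprehension over the destination grid pulls each cell from its unique source a[j-d+n-1][j] (zero when out of range), replacing A's preallocation of a zero grid plus a scatter loop that writes every a[i][j] into glav[j-i+n-1][j].
import Mathlib
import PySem

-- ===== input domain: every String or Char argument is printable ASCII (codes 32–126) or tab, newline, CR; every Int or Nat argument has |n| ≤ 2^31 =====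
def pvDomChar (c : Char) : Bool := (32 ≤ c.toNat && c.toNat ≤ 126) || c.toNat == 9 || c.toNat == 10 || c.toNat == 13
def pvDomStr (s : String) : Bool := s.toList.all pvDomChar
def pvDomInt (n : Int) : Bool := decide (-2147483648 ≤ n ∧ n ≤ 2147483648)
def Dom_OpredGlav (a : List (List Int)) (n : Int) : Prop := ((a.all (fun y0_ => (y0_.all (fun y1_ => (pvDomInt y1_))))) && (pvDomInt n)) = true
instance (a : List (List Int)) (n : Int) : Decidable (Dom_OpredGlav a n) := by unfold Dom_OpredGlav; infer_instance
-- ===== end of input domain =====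

-- B gathers each output cell from its unique source a[j-d+n-1][j] (a nested comprehension
-- over the destination grid) instead of A's scatter of every a[i][j] into a preallocated grid;
-- objective: simpler (no mutation, no preallocation), same O(n^2) cost.

-- ===== PORT A =====
def OpredGlav (a : List (List Int)) (n : Int) : List (List Int) :=
  let kolvo_diag := 2 * n - 1
  -- glav = [0] * kolvo_diag makes int placeholders, each immediately overwritten by the
  -- first loop 'glav[i] = [0] * n'; typed here as empty-row placeholders set the same way
  let glav0 : List (List Int) :=
    (PySem.List.pyRange 0 kolvo_diag 1).foldl
      (fun g i => PySem.List.pySetD g i (List.replicate n.toNat 0))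
      (List.replicate kolvo_diag.toNat [])
  (PySem.List.pyRange 0 n 1).foldl
    (fun g i =>
      (PySem.List.pyRange 0 n 1).foldl
        (fun g j =>
          PySem.List.pySetD g (j - i + n - 1)
            (PySem.List.pySetD (PySem.List.pyGetD g (j - i + n - 1) []) j
              (PySem.List.pyGetD (PySem.List.pyGetD a i []) j 0)))
        g)
    glav0

-- ===== PORT B =====
def OpredGlav_alt (a : List (List Int)) (n : Int) : List (List Int) :=
  (PySem.List.pyRange 0 (2 * n - 1) 1).map fun d =>
    (PySem.List.pyRange 0 n 1).map fun j =>
      if 0 ≤ j - d + n - 1 ∧ j - d + n - 1 < n then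
        PySem.List.pyGetD (PySem.List.pyGetD a (j - d + n - 1) []) j 0
      else 0

-- ===== PRECONDITION & SPEC =====
-- Pre_ excludes exactly the inputs where the Python A raises: n outside [1, 100]
-- (AssertionError) and matrices with fewer than n rows or a row among the first n
-- shorter than n (IndexError on a[i][j]).
def Pre_OpredGlav (a : List (List Int)) (n : Int) : Prop :=
  1 ≤ n ∧ n ≤ 100 ∧ n.toNat ≤ a.length ∧ ∀ r ∈ a.take n.toNat, n.toNat ≤ r.length
instance (a : List (List Int)) (n : Int) : Decidable (Pre_OpredGlav a n) := by
  unfold Pre_OpredGlav; infer_instance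

def pvWitness_OpredGlav : List (List Int) × Int := ([[1, 2], [3, 4]], 2)

def Spec_OpredGlav (a : List (List Int)) (n : Int) (out : List (List Int)) : Prop := out = OpredGlav_alt a n
instance (a : List (List Int)) (n : Int) (out : List (List Int)) : Decidable (Spec_OpredGlav a n out) := by unfold Spec_OpredGlav; infer_instance

-- ===== CLAIM (what is proved, stated in full; the proofs are below) =====
def Claim_equal_OpredGlav : Prop := ∀ (a : List (List Int)) (n : Int), Dom_OpredGlav a n → Pre_OpredGlav a n → Spec_OpredGlav a n (OpredGlav a n)

-- ===== LEMMAS AND PROOFS =====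

-- the cell access expression shared by both ports (total: defaults outside range)
def pvA (a : List (List Int)) (i j : Int) : Int :=
  PySem.List.pyGetD (PySem.List.pyGetD a i []) j 0

-- the gather grid with sources restricted to rows < k ("state after k outer iterations of A")
def pvGath (a : List (List Int)) (n k : Int) : List (List Int) :=
  (List.range (2 * n - 1).toNat).map fun (d : Nat) =>
    (List.range n.toNat).map fun (j : Nat) =>
      if 0 ≤ (j : Int) - (d : Int) + n - 1 ∧ (j : Int) - (d : Int) + n - 1 < k
      then pvA a ((j : Int) - (d : Int) + n - 1) (j : Int) else 0

-- state in the middle of A's outer iteration i = k, after inner iterations j < m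
def pvMid (a : List (List Int)) (n k : Int) (m : Nat) : List (List Int) :=
  (List.range (2 * n - 1).toNat).map fun (d : Nat) =>
    (List.range n.toNat).map fun (j : Nat) =>
      if j < m ∧ (j : Int) - (d : Int) + n - 1 = k then pvA a k (j : Int)
      else if 0 ≤ (j : Int) - (d : Int) + n - 1 ∧ (j : Int) - (d : Int) + n - 1 < k
      then pvA a ((j : Int) - (d : Int) + n - 1) (j : Int) else 0

lemma pyRange_zero_eq (b : Int) :
    PySem.List.pyRange 0 b 1 = (List.range b.toNat).map (fun (k : Nat) => (k : Int)) := by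
  rw [PySem.List.pyRange_one]
  simp only [sub_zero, zero_add]

lemma set_map_range {α : Type} (f : Nat → α) (L t : Nat) (v : α) (h : t < L) :
    ((List.range L).map f).set t v
      = (List.range L).map (fun d => if d = t then v else f d) := by
  apply List.ext_getElem
  · simp
  · intro i h1 h2
    simp only [List.length_set, List.length_map, List.length_range] at h1
    rw [List.getElem_set]
    simp only [List.getElem_map, List.getElem_range]
    by_cases he : t = i
    · subst he; simp
    · rw [if_neg he, if_neg (fun hh => he hh.symm)]

-- the initial fill loop produces the gather grid with no sources yet
lemma fill_fold (n : Int) (a : List (List Int)) :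
    (PySem.List.pyRange 0 (2 * n - 1) 1).foldl
      (fun g i => PySem.List.pySetD g i (List.replicate n.toNat 0))
      (List.replicate (2 * n - 1).toNat []) = pvGath a n 0 := by
  rw [pyRange_zero_eq, List.foldl_map]
  have key : ∀ (L : Nat) (g : List (List Int)),
      (List.range L).foldl (fun g (k : Nat) => PySem.List.pySetD g (k : Int) (List.replicate n.toNat 0)) g
        = (List.range g.length).map (fun t => if t < L then List.replicate n.toNat 0 else g.getD t []) := by
    intro L
    induction L with
    | zero =>
        intro g
        simp only [List.range_zero, List.foldl_nil, Nat.not_lt_zero, if_false]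
        apply List.ext_getElem
        · simp
        · intro i h1 h2
          simp only [List.length_map, List.length_range] at h2
          simp only [List.getElem_map, List.getElem_range]
          rw [List.getD_eq_getElem?_getD, List.getElem?_eq_getElem h1]
          rfl
    | succ L ih =>
        intro g
        rw [List.range_succ, List.foldl_append]
        rw [ih g]
        simp only [List.foldl_cons, List.foldl_nil, PySem.List.pySetD_natCast]
        by_cases hL : L < g.length
        · rw [set_map_range _ _ _ _ (by simpa using hL)]
          apply List.map_congr_left
          intro t ht
          simp only [List.mem_range] at ht
          split_ifs <;> first | rfl | omega
        · rw [List.set_eq_of_length_le (by simpa using not_lt.mp hL)]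
          apply List.map_congr_left
          intro t ht
          simp only [List.mem_range] at ht
          split_ifs <;> first | rfl | omega
  rw [key]
  unfold pvGath
  simp only [List.length_replicate]
  apply List.map_congr_left
  intro t ht
  simp only [List.mem_range] at ht
  simp only [ht, if_true]
  have h0 : ∀ j : Nat, ¬ (0 ≤ (j : Int) - t + n - 1 ∧ (j : Int) - t + n - 1 < 0) := by
    intro j; omega
  simp only [h0, if_false]
  apply List.ext_getElem
  · simp
  · intro i h1 h2
    simp

lemma mid_zero (a : List (List Int)) (n k : Int) : pvMid a n k 0 = pvGath a n k := by
  unfold pvMid pvGath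
  apply List.map_congr_left; intro d _
  apply List.map_congr_left; intro j _
  simp

lemma mid_full (a : List (List Int)) (n : Int) (k : Nat) :
    pvMid a n k n.toNat = pvGath a n ((k : Int) + 1) := by
  unfold pvMid pvGath
  apply List.map_congr_left; intro d hd
  apply List.map_congr_left; intro j hj
  simp only [List.mem_range] at hd hj
  by_cases h1 : (j : Int) - (d : Int) + n - 1 = (k : Int)
  · rw [if_pos ⟨hj, h1⟩, if_pos (by constructor <;> omega), h1]
  · rw [if_neg (by omega)]
    split_ifs <;> first | rfl | omega

-- one inner-loop step of A, applied to the mid state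
lemma mid_step (a : List (List Int)) (n : Int) (k m : Nat)
    (hn : 1 ≤ n) (hk : k < n.toNat) (hm : m < n.toNat) :
    PySem.List.pySetD (pvMid a n k m) ((m : Int) - k + n - 1)
      (PySem.List.pySetD
        (PySem.List.pyGetD (pvMid a n k m) ((m : Int) - k + n - 1) []) (m : Int)
        (PySem.List.pyGetD (PySem.List.pyGetD a (k : Int) []) (m : Int) 0))
      = pvMid a n k (m + 1) := by
  have hD0 : (0 : Int) ≤ (m : Int) - k + n - 1 := by omega
  set Dn : Nat := ((m : Int) - k + n - 1).toNat with hDn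
  have hDcast : ((m : Int) - k + n - 1) = (Dn : Int) := by omega
  have hDlt : Dn < (2 * n - 1).toNat := by omega
  rw [hDcast, PySem.List.pySetD_natCast]
  unfold pvMid
  rw [PySem.List.pyGetD_natCast, List.getD_eq_getElem?_getD]
  simp only [List.getElem?_map, List.getElem?_range, hDlt]
  simp only [Option.map_some, Option.getD_some, PySem.List.pySetD_natCast]
  rw [set_map_range _ _ _ _ hDlt, set_map_range _ _ _ _ hm]
  apply List.map_congr_left
  intro d hd
  simp only [List.mem_range] at hd
  by_cases hdD : d = Dn
  · subst hdD
    rw [if_pos rfl]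
    apply List.map_congr_left
    intro j hj
    simp only [List.mem_range] at hj
    by_cases hjm : j = m
    · subst hjm
      rw [if_pos rfl, if_pos (by constructor <;> omega)]
      rfl
    · rw [if_neg hjm]
      split_ifs <;> first | rfl | omega
  · rw [if_neg hdD]
    apply List.map_congr_left
    intro j hj
    simp only [List.mem_range] at hj
    split_ifs <;> first | rfl | omega

-- the whole inner loop of A's outer iteration i = k
lemma inner_loop (a : List (List Int)) (n : Int) (k : Nat)
    (hn : 1 ≤ n) (hk : k < n.toNat) :
    ((List.range n.toNat).map (fun (k : Nat) => (k : Int))).foldl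
      (fun g j =>
        PySem.List.pySetD g (j - (k : Int) + n - 1)
          (PySem.List.pySetD (PySem.List.pyGetD g (j - (k : Int) + n - 1) []) j
            (PySem.List.pyGetD (PySem.List.pyGetD a (k : Int) []) j 0)))
      (pvGath a n k) = pvGath a n ((k : Int) + 1) := by
  rw [List.foldl_map, ← mid_zero a n k, ← mid_full a n k]
  have : ∀ (M : Nat), M ≤ n.toNat →
      (List.range M).foldl
        (fun g (j : Nat) =>
          PySem.List.pySetD g ((j : Int) - (k : Int) + n - 1)
            (PySem.List.pySetD (PySem.List.pyGetD g ((j : Int) - (k : Int) + n - 1) []) (j : Int)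
              (PySem.List.pyGetD (PySem.List.pyGetD a (k : Int) []) (j : Int) 0)))
        (pvMid a n k 0) = pvMid a n k M := by
    intro M
    induction M with
    | zero => intro _; simp
    | succ M ih =>
        intro hM
        rw [List.range_succ, List.foldl_append, ih (by omega)]
        simp only [List.foldl_cons, List.foldl_nil]
        exact mid_step a n k M hn hk (by omega)
  exact this n.toNat le_rfl

-- B computes the full gather grid
lemma alt_eq_gath (a : List (List Int)) (n : Int) :
    OpredGlav_alt a n = pvGath a n n := by
  unfold OpredGlav_alt pvGath
  simp only [pyRange_zero_eq, List.map_map]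
  apply List.map_congr_left
  intro d _
  apply List.map_congr_left
  intro j _
  simp [pvA]

-- ===== VERDICT (by name: the statement is the Claim_ definition above) =====
theorem OpredGlav_spec : Claim_equal_OpredGlav := by
  intro a n _ hpre
  obtain ⟨hn, -, -, -⟩ := hpre
  unfold Spec_OpredGlav OpredGlav
  rw [alt_eq_gath]
  simp only []
  rw [fill_fold n a]
  rw [pyRange_zero_eq n, List.foldl_map]
  have : ∀ (K : Nat), K ≤ n.toNat →
      (List.range K).foldl
        (fun g (i : Nat) =>
          ((List.range n.toNat).map (fun (k : Nat) => (k : Int))).foldl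
            (fun g j =>
              PySem.List.pySetD g (j - (i : Int) + n - 1)
                (PySem.List.pySetD (PySem.List.pyGetD g (j - (i : Int) + n - 1) []) j
                  (PySem.List.pyGetD (PySem.List.pyGetD a (i : Int) []) j 0)))
            g)
        (pvGath a n 0) = pvGath a n (K : Int) := by
    intro K
    induction K with
    | zero => intro _; simp
    | succ K ih =>
        intro hK
        rw [List.range_succ, List.foldl_append, ih (by omega)]
        simp only [List.foldl_cons, List.foldl_nil]
        push_cast
        exact inner_loop a n K (by omega) (by omega)
  have h := this n.toNat le_rfl
  rw [h]
  congr 1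
  omega
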